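-- pv_equiv track=rewrite | github.com/MoltoRubato/FOC_Project2 | P2Q2.py | make_color_mutex_graph
-- ===== SOURCE A (Python) =====
-- from collections import defaultdict as dd
--
-- DIFF_COLOR = 1
--
-- ID = 0
--
-- COLOR = 1
--
-- def make_color_mutex_graph(evidences):
--     '''Takes a list of evidences as input. Finds all links (negation_edges)
--     between gnomes. Returns a graph (dictionary) of gnomes with different hat
--     colors.'''
--     # The graph will be in the form of a dictionary
--     # We will first gather all linked IDs in a set to avoid redundancy
--     graph = dd(set)
--     diff_ids = []
--
--     # First, we will pick out the ID-pairs with different hat colors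
--     for evidence in evidences:
--         if evidence[COLOR] == DIFF_COLOR:
--             diff_ids.append(evidence[ID])
--
--     # Next, we will Link those ID-pairs to each other in the graph
--     for id1, id2 in diff_ids:
--         graph[id1].add(id2)
--         graph[id2].add(id1)
--
--     # Lastly, we will sort the IDs in an increasing order in a list
--     for idnum in graph:
--         graph[idnum] = sorted(graph[idnum])
--
--     return dict(graph)
-- ===== SOURCE B (Python) =====
-- # B: single pass over the evidences with plain dict of always-sorted duplicate-free
-- # neighbour lists maintained by in-order insertion -- no sets, no final sorting pass.
-- DIFF_COLOR = 1
-- ID = 0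
-- COLOR = 1
--
-- def _insort_unique(x, xs):
--     """Return xs (sorted, duplicate-free) with x inserted at its sorted position,
--     unchanged if x is already present."""
--     for i, y in enumerate(xs):
--         if x < y:
--             return xs[:i] + [x] + xs[i:]
--         if x == y:
--             return xs
--     return xs + [x]
--
-- def make_color_mutex_graph(evidences):
--     graph = {}
--     for evidence in evidences:
--         if evidence[COLOR] == DIFF_COLOR:
--             a, b = evidence[ID]
--             graph[a] = _insort_unique(b, graph.get(a, []))
--             graph[b] = _insort_unique(a, graph.get(b, []))
--     return graph
-- ===== Notes on version B (the rewrite author's own statement) =====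
-- stated objective: alternative
-- what changed: Replaces A's three passes (filter to diff_ids, build defaultdict of sets, sort every set at the end) by one pass over the evidences that maintains a plain dict of already-sorted duplicate-free neighbour lists via in-order insertion, so no sets and no final sorting pass exist.
import Mathlib
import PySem

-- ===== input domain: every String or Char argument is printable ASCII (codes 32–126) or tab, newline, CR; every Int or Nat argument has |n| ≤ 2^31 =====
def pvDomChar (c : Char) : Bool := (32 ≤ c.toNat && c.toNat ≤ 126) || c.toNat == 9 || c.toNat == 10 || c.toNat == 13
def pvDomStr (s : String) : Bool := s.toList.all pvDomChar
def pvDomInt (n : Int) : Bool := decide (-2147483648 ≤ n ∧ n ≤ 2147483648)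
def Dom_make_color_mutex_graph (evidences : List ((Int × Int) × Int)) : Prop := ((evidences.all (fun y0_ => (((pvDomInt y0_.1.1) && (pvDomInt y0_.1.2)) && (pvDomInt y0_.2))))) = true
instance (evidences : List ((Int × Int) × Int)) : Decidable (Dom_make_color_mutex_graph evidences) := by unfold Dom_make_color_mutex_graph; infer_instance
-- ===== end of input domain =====

-- B replaces A's three passes (filter, defaultdict-of-sets, final sort loop) by one pass
-- maintaining sorted duplicate-free neighbour lists via in-order insertion (objective: alternative).

-- ===== PORT A =====
def make_color_mutex_graph (evidences : List ((Int × Int) × Int)) : List (Int × List Int) :=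
  -- graph = dd(set); diff_ids = []
  -- for evidence in evidences: if evidence[COLOR] == DIFF_COLOR: diff_ids.append(evidence[ID])
  let diff_ids : List (Int × Int) :=
    evidences.foldl (fun acc evidence => if evidence.2 == 1 then acc ++ [evidence.1] else acc) []
  -- for id1, id2 in diff_ids: graph[id1].add(id2); graph[id2].add(id1)   (defaultdict: missing key -> empty set)
  let graph : PySem.Dict Int (PySem.Set Int) :=
    diff_ids.foldl (fun g p =>
      let g := g.insert p.1 (PySem.Set.add (g.getD p.1 PySem.Set.empty) p.2)
      g.insert p.2 (PySem.Set.add (g.getD p.2 PySem.Set.empty) p.1)) PySem.Dict.empty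
  -- for idnum in graph: graph[idnum] = sorted(graph[idnum]); return dict(graph)
  graph.items.map (fun kv => (kv.1, PySem.List.sorted kv.2 (fun x => x)))

-- ===== PORT B =====
-- _insort_unique(x, xs): xs with x inserted at sorted position, unchanged if present
def pyInsortUnique (x : Int) : List Int → List Int
  | [] => [x]
  | y :: ys => if x < y then x :: y :: ys else if x == y then y :: ys else y :: pyInsortUnique x ys

def make_color_mutex_graph_alt (evidences : List ((Int × Int) × Int)) : List (Int × List Int) :=
  let graph : PySem.Dict Int (List Int) :=
    evidences.foldl (fun g evidence =>
      if evidence.2 == 1 then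
        let a := evidence.1.1
        let b := evidence.1.2
        let g := g.insert a (pyInsortUnique b (g.getD a []))
        g.insert b (pyInsortUnique a (g.getD b []))
      else g) PySem.Dict.empty
  graph.items

-- ===== PRECONDITION & SPEC =====
def Spec_make_color_mutex_graph (evidences : List ((Int × Int) × Int)) (out : List (Int × List Int)) : Prop := out = make_color_mutex_graph_alt evidences
instance (evidences : List ((Int × Int) × Int)) (out : List (Int × List Int)) : Decidable (Spec_make_color_mutex_graph evidences out) := by unfold Spec_make_color_mutex_graph; infer_instance

-- ===== CLAIM (what is proved, stated in full; the proofs are below) =====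
def Claim_equal_make_color_mutex_graph : Prop := ∀ (evidences : List ((Int × Int) × Int)), Dom_make_color_mutex_graph evidences → Spec_make_color_mutex_graph evidences (make_color_mutex_graph evidences)

-- ===== LEMMAS AND PROOFS =====

-- the value map relating A's dict entries to B's
def pvVal (s : PySem.Set Int) : List Int := PySem.List.sorted s (fun x => x)
def pvF (kv : Int × PySem.Set Int) : Int × List Int := (kv.1, pvVal kv.2)

-- invariant between A's dict of sets and B's dict of sorted lists
def pvRel (gA : PySem.Dict Int (PySem.Set Int)) (gB : PySem.Dict Int (List Int)) : Prop :=
  gB.items = gA.items.map pvF ∧ gA.keys.Nodup ∧ ∀ kv ∈ gA.items, (kv.2 : List Int).Nodup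

theorem insort_mem (v : Int) (l : List Int) (z : Int) :
    z ∈ pyInsortUnique v l ↔ z = v ∨ z ∈ l := by
  induction l with
  | nil => simp [pyInsortUnique]
  | cons y ys ih =>
    simp only [pyInsortUnique]
    split_ifs with h1 h2
    · simp only [List.mem_cons]
    · simp only [beq_iff_eq] at h2
      subst h2
      simp only [List.mem_cons]; tauto
    · simp only [List.mem_cons, ih]; tauto

theorem insort_pairwise (v : Int) (l : List Int) (h : l.Pairwise (· < ·)) :
    (pyInsortUnique v l).Pairwise (· < ·) := by
  induction l with
  | nil => simp [pyInsortUnique]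
  | cons y ys ih =>
    rw [List.pairwise_cons] at h
    obtain ⟨hy, hys⟩ := h
    simp only [pyInsortUnique]
    split_ifs with h1 h2
    · refine List.pairwise_cons.2 ⟨?_, List.pairwise_cons.2 ⟨hy, hys⟩⟩
      intro z hz
      rcases List.mem_cons.1 hz with rfl | hz2
      · exact h1
      · exact lt_trans h1 (hy z hz2)
    · exact List.pairwise_cons.2 ⟨hy, hys⟩
    · refine List.pairwise_cons.2 ⟨?_, ih hys⟩
      intro z hz
      rcases (insort_mem v ys z).1 hz with rfl | hz
      · simp only [beq_iff_eq] at h2; omega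
      · exact hy z hz

theorem insort_of_mem (v : Int) (l : List Int) (h : l.Pairwise (· < ·)) (hm : v ∈ l) :
    pyInsortUnique v l = l := by
  induction l with
  | nil => simp at hm
  | cons y ys ih =>
    rw [List.pairwise_cons] at h
    obtain ⟨hy, hys⟩ := h
    rcases List.mem_cons.1 hm with rfl | hm
    · simp [pyInsortUnique]
    · have : y < v := hy v hm
      simp only [pyInsortUnique]
      rw [if_neg (by omega), if_neg (by simp; omega), ih hys hm]

theorem insort_of_not_mem (v : Int) (l : List Int) (hm : v ∉ l) :
    (pyInsortUnique v l).Perm (v :: l) := by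
  induction l with
  | nil => simp [pyInsortUnique]
  | cons y ys ih =>
    simp only [List.mem_cons, not_or] at hm
    simp only [pyInsortUnique]
    split_ifs with h1 h2
    · exact List.Perm.refl _
    · simp at h2; exact absurd h2 hm.1
    · exact (List.Perm.cons y (ih hm.2)).trans (List.Perm.swap v y ys)

theorem sorted_pairwise_lt (s : List Int) (h : s.Nodup) :
    (PySem.List.sorted s (fun x => x)).Pairwise (· < ·) := by
  have hp := PySem.List.sorted_pairwise s (fun x => x)
  have hnd : (PySem.List.sorted s (fun x => x)).Nodup :=
    (PySem.List.sorted_perm s (fun x => x) false).nodup_iff.2 h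
  have := hp.and hnd
  exact this.imp (fun {a b} hab => lt_of_le_of_ne hab.1 hab.2)

theorem nodup_set_add (s : PySem.Set Int) (v : Int) (h : s.Nodup) :
    (PySem.Set.add s v).Nodup := by
  unfold PySem.Set.add
  split_ifs with hc
  · exact h
  · refine List.Nodup.append h (List.nodup_singleton v) ?_
    intro x hx hx2
    simp at hx2; subst hx2
    exact absurd (by simpa [PySem.Set.contains] using hx) (by simpa using hc)

theorem sorted_add (s : PySem.Set Int) (v : Int) (h : s.Nodup) :
    pvVal (PySem.Set.add s v) = pyInsortUnique v (pvVal s) := by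
  have hperm := PySem.List.sorted_perm s (fun x => x) false
  have hpl : (pvVal s).Pairwise (· < ·) := sorted_pairwise_lt s h
  by_cases hv : v ∈ s
  · have hmem : v ∈ pvVal s := by
      unfold pvVal; rw [(PySem.List.sorted_perm s (fun x => x) false).mem_iff]; exact hv
    rw [insort_of_mem v _ hpl hmem]
    have : PySem.Set.add s v = s := by
      unfold PySem.Set.add
      rw [if_pos (by simpa [PySem.Set.contains] using hv)]
    rw [this]
  · have hnm : v ∉ pvVal s := by
      unfold pvVal; rw [(PySem.List.sorted_perm s (fun x => x) false).mem_iff]; exact hv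
    have hadd : PySem.Set.add s v = s ++ [v] := by
      unfold PySem.Set.add
      rw [if_neg (by simpa [PySem.Set.contains] using hv)]
    unfold pvVal
    rw [hadd]
    refine PySem.List.sorted_eq_of_perm_of_pairwise_lt _ _ _ ?_ (insort_pairwise v _ hpl)
    exact (insort_of_not_mem v _ hnm).trans ((hperm.cons v).trans (List.perm_append_comm (l₁ := [v]) (l₂ := s)))

theorem get?_map_pvF (l : List (Int × PySem.Set Int)) (k : Int) :
    (PySem.Dict.mk (l.map pvF)).get? k = ((PySem.Dict.mk l).get? k).map pvVal := by
  induction l with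
  | nil => simp [PySem.Dict.get?]
  | cons kv rest ih =>
    obtain ⟨k0, v0⟩ := kv
    simp only [List.map_cons, pvF]
    rw [PySem.Dict.get?_mk_cons, PySem.Dict.get?_mk_cons]
    split_ifs <;> simp [ih]

theorem rel_get? (gA : PySem.Dict Int (PySem.Set Int)) (gB : PySem.Dict Int (List Int))
    (h : gB.items = gA.items.map pvF) (k : Int) : gB.get? k = (gA.get? k).map pvVal := by
  have : gB = PySem.Dict.mk (gA.items.map pvF) := by
    cases gB; simpa using h
  rw [this, get?_map_pvF]

theorem rel_getD (gA : PySem.Dict Int (PySem.Set Int)) (gB : PySem.Dict Int (List Int))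
    (h : gB.items = gA.items.map pvF) (k : Int) :
    gB.getD k [] = pvVal (gA.getD k PySem.Set.empty) := by
  rw [PySem.Dict.getD_eq_get?_getD, rel_get? gA gB h k]
  cases hg : gA.get? k with
  | none => rw [PySem.Dict.getD_of_get?_eq_none _ _ hg]; rfl
  | some s => rw [PySem.Dict.getD_of_get?_eq_some _ _ hg]; rfl

theorem rel_keys (gA : PySem.Dict Int (PySem.Set Int)) (gB : PySem.Dict Int (List Int))
    (h : gB.items = gA.items.map pvF) : gB.keys = gA.keys := by
  simp only [PySem.Dict.keys, h, List.map_map]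
  rfl

theorem rel_insert (gA : PySem.Dict Int (PySem.Set Int)) (gB : PySem.Dict Int (List Int))
    (h : pvRel gA gB) (k v : Int) :
    pvRel (gA.insert k (PySem.Set.add (gA.getD k PySem.Set.empty) v))
          (gB.insert k (pyInsortUnique v (gB.getD k []))) := by
  obtain ⟨hitems, hknd, hvnd⟩ := h
  have hndk : (gA.getD k PySem.Set.empty).Nodup := by
    cases hg : gA.get? k with
    | none => rw [PySem.Dict.getD_of_get?_eq_none _ _ hg]; exact List.nodup_nil
    | some s =>
      rw [PySem.Dict.getD_of_get?_eq_some _ _ hg]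
      exact hvnd (k, s) (PySem.Dict.mem_items_of_get?_eq_some gA hg)
  have hval : pyInsortUnique v (gB.getD k []) = pvVal (PySem.Set.add (gA.getD k PySem.Set.empty) v) := by
    rw [rel_getD gA gB hitems, sorted_add _ _ hndk]
  have hcont : gB.contains k = gA.contains k := by
    rw [PySem.Dict.contains_eq_decide_mem_keys, PySem.Dict.contains_eq_decide_mem_keys,
      rel_keys gA gB hitems]
  refine ⟨?_, PySem.Dict.nodup_keys_insert _ _ _ hknd, ?_⟩
  · rw [PySem.Dict.items_insert, PySem.Dict.items_insert, hval, hitems, hcont]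
    split_ifs with hc
    · rw [List.map_map, List.map_map]
      apply List.map_congr_left
      intro p _
      by_cases hp : p.1 = k
      · simp [Function.comp, pvF, hp]
      · simp [Function.comp, pvF, hp]
    · rw [List.map_append]
      rfl
  · intro kv hkv
    rcases (PySem.Dict.mem_items_insert _ _ _ _).1 hkv with rfl | ⟨hmem, _⟩
    · exact nodup_set_add _ _ hndk
    · exact hvnd kv hmem

theorem rel_fold (l : List ((Int × Int) × Int)) (gA : PySem.Dict Int (PySem.Set Int))
    (gB : PySem.Dict Int (List Int)) (h : pvRel gA gB) :
    pvRel
      (l.foldl (fun g e => if e.2 == 1 then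
          (g.insert e.1.1 (PySem.Set.add (g.getD e.1.1 PySem.Set.empty) e.1.2)).insert e.1.2
            (PySem.Set.add ((g.insert e.1.1 (PySem.Set.add (g.getD e.1.1 PySem.Set.empty) e.1.2)).getD e.1.2 PySem.Set.empty) e.1.1)
        else g) gA)
      (l.foldl (fun g e => if e.2 == 1 then
          (g.insert e.1.1 (pyInsortUnique e.1.2 (g.getD e.1.1 []))).insert e.1.2
            (pyInsortUnique e.1.1 ((g.insert e.1.1 (pyInsortUnique e.1.2 (g.getD e.1.1 []))).getD e.1.2 []))
        else g) gB) := by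
  induction l generalizing gA gB with
  | nil => exact h
  | cons e rest ih =>
    simp only [List.foldl_cons]
    by_cases he : e.2 == 1
    · rw [if_pos he, if_pos he]
      exact ih _ _ (rel_insert _ _ (rel_insert _ _ h e.1.1 e.1.2) e.1.2 e.1.1)
    · rw [if_neg he, if_neg he]
      exact ih _ _ h

-- ===== VERDICT (by name: the statement is the Claim_ definition above) =====

theorem make_color_mutex_graph_spec : Claim_equal_make_color_mutex_graph := by
  intro evidences _
  unfold Spec_make_color_mutex_graph make_color_mutex_graph make_color_mutex_graph_alt
  simp only [PySem.List.foldl_append_if (fun e => e.2 == 1) (fun e => e.1) evidences [],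
    List.nil_append, List.foldl_map, List.foldl_filter]
  have hbase : pvRel PySem.Dict.empty PySem.Dict.empty :=
    ⟨rfl, PySem.Dict.nodup_keys_empty, by intro kv hkv; simp [PySem.Dict.empty] at hkv⟩
  have h := rel_fold evidences PySem.Dict.empty PySem.Dict.empty hbase
  exact h.1.symm
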